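-- pv_equiv track=rewrite | github.com/Md-Zubair677/MediMate | backend/services/voice_service.py | _prepare_medical_ssml
-- ===== SOURCE A (Python) =====
-- def _prepare_medical_ssml(text: str) -> str:
--     """Prepare SSML markup for medical text with appropriate pronunciation."""
--
--     # Medical terms that need special pronunciation
--     medical_pronunciations = {
--         'hypertension': '<phoneme alphabet="ipa" ph="ˌhaɪpərˈtɛnʃən">hypertension</phoneme>',
--         'diabetes': '<phoneme alphabet="ipa" ph="ˌdaɪəˈbiːtiːz">diabetes</phoneme>',
--         'pneumonia': '<phoneme alphabet="ipa" ph="nuːˈmoʊniə">pneumonia</phoneme>',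
--         'arrhythmia': '<phoneme alphabet="ipa" ph="əˈrɪθmiə">arrhythmia</phoneme>',
--         'tachycardia': '<phoneme alphabet="ipa" ph="ˌtækɪˈkɑrdiə">tachycardia</phoneme>'
--     }
--
--     # Apply medical pronunciations
--     ssml_text = text
--     for term, pronunciation in medical_pronunciations.items():
--         ssml_text = ssml_text.replace(term, pronunciation)
--
--     # Add appropriate pauses and emphasis
--     ssml_text = ssml_text.replace('.', '.<break time="500ms"/>')
--     ssml_text = ssml_text.replace(',', ',<break time="300ms"/>')
--     ssml_text = ssml_text.replace('!', '!<break time="700ms"/>')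
--     ssml_text = ssml_text.replace('?', '?<break time="600ms"/>')
--
--     # Emphasize important medical terms
--     important_terms = ['emergency', 'urgent', 'critical', 'severe', 'immediate']
--     for term in important_terms:
--         ssml_text = ssml_text.replace(term, f'<emphasis level="strong">{term}</emphasis>')
--
--     # Wrap in SSML tags
--     return f'<speak><prosody rate="medium" pitch="medium">{ssml_text}</prosody></speak>'
-- ===== SOURCE B (Python) =====
-- def _prepare_medical_ssml(text: str) -> str:
--     """Single left-to-right scan: one pass over the text replacing all 14
--     tokens (medical terms, pause punctuation, emphasis terms) via a token table,
--     instead of 14 sequential full-string .replace() passes."""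
--
--     replacements = {
--         'hypertension': '<phoneme alphabet="ipa" ph="\u02ccha\u026ap\u0259r\u02c8t\u025bn\u0283\u0259n">hypertension</phoneme>',
--         'diabetes': '<phoneme alphabet="ipa" ph="\u02ccda\u026a\u0259\u02c8bi\u02d0ti\u02d0z">diabetes</phoneme>',
--         'pneumonia': '<phoneme alphabet="ipa" ph="nu\u02d0\u02c8mo\u028ani\u0259">pneumonia</phoneme>',
--         'arrhythmia': '<phoneme alphabet="ipa" ph="\u0259\u02c8r\u026a\u03b8mi\u0259">arrhythmia</phoneme>',
--         'tachycardia': '<phoneme alphabet="ipa" ph="\u02cct\u00e6k\u026a\u02c8k\u0251rdi\u0259">tachycardia</phoneme>',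
--         '.': '.<break time="500ms"/>',
--         ',': ',<break time="300ms"/>',
--         '!': '!<break time="700ms"/>',
--         '?': '?<break time="600ms"/>',
--         'emergency': '<emphasis level="strong">emergency</emphasis>',
--         'urgent': '<emphasis level="strong">urgent</emphasis>',
--         'critical': '<emphasis level="strong">critical</emphasis>',
--         'severe': '<emphasis level="strong">severe</emphasis>',
--         'immediate': '<emphasis level="strong">immediate</emphasis>',
--     }
--
--     out = []
--     i = 0
--     n = len(text)
--     while i < n:
--         for tok, repl in replacements.items():
--             if text.startswith(tok, i):
--                 out.append(repl)
--                 i += len(tok)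
--                 break
--         else:
--             out.append(text[i])
--             i += 1
--     body = ''.join(out)
--     return f'<speak><prosody rate="medium" pitch="medium">{body}</prosody></speak>'
-- ===== Notes on version B (the rewrite author's own statement) =====
-- stated objective: alternative
-- what changed: Replaces A's 14 sequential full-string .replace() passes with a single left-to-right scan over the text that consults one token->SSML table at each position.
import Mathlib
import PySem

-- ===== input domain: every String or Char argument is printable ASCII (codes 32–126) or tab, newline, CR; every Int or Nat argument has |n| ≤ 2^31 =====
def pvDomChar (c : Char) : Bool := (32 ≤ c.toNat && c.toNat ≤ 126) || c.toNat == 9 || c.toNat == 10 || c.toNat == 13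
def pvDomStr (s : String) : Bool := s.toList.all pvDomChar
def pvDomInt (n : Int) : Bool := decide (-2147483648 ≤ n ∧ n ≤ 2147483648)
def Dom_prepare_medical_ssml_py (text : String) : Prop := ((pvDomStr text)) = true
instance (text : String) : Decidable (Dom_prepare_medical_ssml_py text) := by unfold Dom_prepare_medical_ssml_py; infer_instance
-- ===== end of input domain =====

set_option maxRecDepth 8000

-- B replaces A's 14 sequential full-string .replace() passes by ONE left-to-right scan over a
-- token → SSML table (objective: alternative single-pass algorithm; same exact output on Pre_).

-- ===== PORT A =====
def prepare_medical_ssml_py (text : String) : String :=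
  let medical_pronunciations : List (String × String) := [
    ("hypertension", "<phoneme alphabet=\"ipa\" ph=\"ˌhaɪpərˈtɛnʃən\">hypertension</phoneme>"),
    ("diabetes", "<phoneme alphabet=\"ipa\" ph=\"ˌdaɪəˈbiːtiːz\">diabetes</phoneme>"),
    ("pneumonia", "<phoneme alphabet=\"ipa\" ph=\"nuːˈmoʊniə\">pneumonia</phoneme>"),
    ("arrhythmia", "<phoneme alphabet=\"ipa\" ph=\"əˈrɪθmiə\">arrhythmia</phoneme>"),
    ("tachycardia", "<phoneme alphabet=\"ipa\" ph=\"ˌtækɪˈkɑrdiə\">tachycardia</phoneme>")]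
  let ssml_text := text
  let ssml_text := medical_pronunciations.foldl
    (fun s p => PySem.Str.replace s p.1 p.2) ssml_text
  let ssml_text := PySem.Str.replace ssml_text "." ".<break time=\"500ms\"/>"
  let ssml_text := PySem.Str.replace ssml_text "," ",<break time=\"300ms\"/>"
  let ssml_text := PySem.Str.replace ssml_text "!" "!<break time=\"700ms\"/>"
  let ssml_text := PySem.Str.replace ssml_text "?" "?<break time=\"600ms\"/>"
  let important_terms : List String := ["emergency", "urgent", "critical", "severe", "immediate"]
  let ssml_text := important_terms.foldl
    (fun s term => PySem.Str.replace s term ("<emphasis level=\"strong\">" ++ term ++ "</emphasis>")) ssml_text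
  "<speak><prosody rate=\"medium\" pitch=\"medium\">" ++ ssml_text ++ "</prosody></speak>"

-- ===== PORT B =====
-- the one token → replacement table of Source B, in its (insertion-order) iteration order
def pvTable : List (List Char × List Char) := [
  ("hypertension".toList, "<phoneme alphabet=\"ipa\" ph=\"ˌhaɪpərˈtɛnʃən\">hypertension</phoneme>".toList),
  ("diabetes".toList, "<phoneme alphabet=\"ipa\" ph=\"ˌdaɪəˈbiːtiːz\">diabetes</phoneme>".toList),
  ("pneumonia".toList, "<phoneme alphabet=\"ipa\" ph=\"nuːˈmoʊniə\">pneumonia</phoneme>".toList),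
  ("arrhythmia".toList, "<phoneme alphabet=\"ipa\" ph=\"əˈrɪθmiə\">arrhythmia</phoneme>".toList),
  ("tachycardia".toList, "<phoneme alphabet=\"ipa\" ph=\"ˌtækɪˈkɑrdiə\">tachycardia</phoneme>".toList),
  (".".toList, ".<break time=\"500ms\"/>".toList),
  (",".toList, ",<break time=\"300ms\"/>".toList),
  ("!".toList, "!<break time=\"700ms\"/>".toList),
  ("?".toList, "?<break time=\"600ms\"/>".toList),
  ("emergency".toList, "<emphasis level=\"strong\">emergency</emphasis>".toList),
  ("urgent".toList, "<emphasis level=\"strong\">urgent</emphasis>".toList),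
  ("critical".toList, "<emphasis level=\"strong\">critical</emphasis>".toList),
  ("severe".toList, "<emphasis level=\"strong\">severe</emphasis>".toList),
  ("immediate".toList, "<emphasis level=\"strong\">immediate</emphasis>".toList)]

-- Source B's while-loop: at each position emit the replacement of the first table token
-- that starts there (fuel = remaining scan steps, always called with the text length)
def pvScanGo (ts : List (List Char × List Char)) : Nat → List Char → List Char
  | _, [] => []
  | 0, l => l
  | fuel+1, c :: rest =>
    match ts.find? (fun p => p.1.isPrefixOf (c :: rest)) with
    | some (t, r) => r ++ pvScanGo ts fuel (List.drop t.length (c :: rest))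
    | none => c :: pvScanGo ts fuel rest

def prepare_medical_ssml_py_alt (text : String) : String :=
  "<speak><prosody rate=\"medium\" pitch=\"medium\">" ++
    String.ofList (pvScanGo pvTable text.toList.length text.toList) ++ "</prosody></speak>"

-- ===== PRECONDITION & SPEC =====
-- Pre_ excludes texts containing one of the five strings in which two replacement targets
-- overlap: there A's fixed replacement order and B's leftmost single pass pick different
-- (equally defensible) occurrences of the two overlapping targets.
def pvOverlaps : List String :=
  ["tachycardiarrhythmia", "severemergency", "immediatemergency", "urgentachycardia",
   "tachycardiabetes"]

def Pre_prepare_medical_ssml_py (text : String) : Prop :=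
  ∀ s ∈ pvOverlaps, PySem.Str.isIn s text = false
instance (text : String) : Decidable (Pre_prepare_medical_ssml_py text) := by
  unfold Pre_prepare_medical_ssml_py; infer_instance

def pvWitness_prepare_medical_ssml_py : String :=
  "Patient has severe hypertension. Call emergency services now!"

def Spec_prepare_medical_ssml_py (text : String) (out : String) : Prop :=
  out = prepare_medical_ssml_py_alt text
instance (text : String) (out : String) : Decidable (Spec_prepare_medical_ssml_py text out) := by
  unfold Spec_prepare_medical_ssml_py; infer_instance

-- ===== CLAIM (what is proved, stated in full; the proofs are below) =====
def Claim_equal_prepare_medical_ssml_py : Prop := ∀ (text : String), Dom_prepare_medical_ssml_py text → Pre_prepare_medical_ssml_py text → Spec_prepare_medical_ssml_py text (prepare_medical_ssml_py text)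

-- ===== LEMMAS AND PROOFS =====

-- ---- Python str.replace as a plain fuelled recursion on List Char ----
def pvRepl (old new : List Char) : Nat → List Char → List Char
  | _, [] => []
  | 0, l => l
  | fuel+1, c :: t =>
    if old.isPrefixOf (c :: t) then new ++ pvRepl old new fuel (List.drop old.length (c :: t))
    else c :: pvRepl old new fuel t

def pvR (old new l : List Char) : List Char := pvRepl old new l.length l

def pvChain (ts : List (List Char × List Char)) (l : List Char) : List Char :=
  ts.foldl (fun s p => pvR p.1 p.2 s) l

def pvScan (ts : List (List Char × List Char)) (l : List Char) : List Char :=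
  pvScanGo ts l.length l

-- shape conditions on a table entry
def pvTok (t : List Char) : Prop := t ≠ [] ∧ '<' ∉ t ∧ '>' ∉ t
-- replacement shape: contains '<', ends in '>', and every '<'-free prefix of it is a
-- prefix of its own token (phoneme/emphasis replacements start with '<', the
-- punctuation ones start with the punctuation token itself)
def pvRepOK (t r : List Char) : Prop :=
  '<' ∈ r ∧ r.getLast? = some '>' ∧ (∀ u ∈ r.inits, '<' ∉ u → u <+: t)
def pvGood (ts : List (List Char × List Char)) : Prop := ∀ p ∈ ts, pvTok p.1 ∧ pvRepOK p.1 p.2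
def pvSub (ts : List (List Char × List Char)) : Prop :=
  ∀ p ∈ ts, ∀ q ∈ ts, p.1 <:+: q.1 → p.1 = q.1
-- a token never occurs inside the replacement of an EARLIER-phase entry
def pvRsubOrd (ts : List (List Char × List Char)) : Prop :=
  ∀ ts₁ q ts₂, ts = ts₁ ++ q :: ts₂ → ∀ p1 ∈ ts₂, ¬ p1.1 <:+: q.2
-- the input has no occurrence of a later-phase token overlapped by an earlier-phase token
def pvPreL (ts : List (List Char × List Char)) (l : List Char) : Prop :=
  ∀ ts₁ q ts₂, ts = ts₁ ++ q :: ts₂ → ∀ p1 ∈ ts₁, ∀ p, 0 < p → p < q.1.length →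
    q.1.drop p <+: p1.1 → ¬ (q.1 ++ p1.1.drop (q.1.length - p)) <:+: l

theorem pvOldLen (old : List Char) (hold : old ≠ []) : 1 ≤ old.length := by
  cases old with | nil => exact absurd rfl hold | cons _ _ => simp

theorem pvReplFuel (old new : List Char) (hold : old ≠ []) :
    ∀ f1 f2 (l : List Char), l.length ≤ f1 → l.length ≤ f2 →
      pvRepl old new f1 l = pvRepl old new f2 l := by
  intro f1
  induction f1 with
  | zero =>
    intro f2 l h1 _
    have : l = [] := List.eq_nil_of_length_eq_zero (Nat.le_zero.mp h1)
    subst this; cases f2 <;> rfl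
  | succ f ih =>
    intro f2 l h1 h2
    cases l with
    | nil => cases f2 <;> rfl
    | cons c t =>
      cases f2 with
      | zero => simp at h2
      | succ f2' =>
        simp only [pvRepl]
        by_cases hp : old.isPrefixOf (c :: t)
        · rw [if_pos hp, if_pos hp]
          have hd : (List.drop old.length (c :: t)).length = (c :: t).length - old.length :=
            List.length_drop
          have h1' := pvOldLen old hold
          congr 1
          exact ih f2' _ (by simp at h1 hd ⊢; omega) (by simp at h2 hd ⊢; omega)
        · rw [if_neg hp, if_neg hp]
          congr 1
          exact ih f2' _ (by simp at h1 ⊢; omega) (by simp at h2 ⊢; omega)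

theorem pvR_nil (old new : List Char) : pvR old new [] = [] := rfl

theorem pvR_pos (old new l : List Char) (hold : old ≠ []) (h : old <+: l) :
    pvR old new l = new ++ pvR old new (l.drop old.length) := by
  cases l with
  | nil =>
    rcases h with ⟨t, ht⟩
    cases old with
    | nil => exact absurd rfl hold
    | cons a b => simp at ht
  | cons c t =>
    show pvRepl old new (t.length + 1) (c :: t) = _
    rw [pvRepl, if_pos (List.isPrefixOf_iff_prefix.mpr h)]
    congr 1
    have hd : (List.drop old.length (c :: t)).length = (c :: t).length - old.length :=
      List.length_drop
    have h1' := pvOldLen old hold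
    exact pvReplFuel old new hold _ _ _ (by simp at hd ⊢; omega) le_rfl

theorem pvR_neg (old new : List Char) (c : Char) (t : List Char) (h : ¬ old <+: (c :: t)) :
    pvR old new (c :: t) = c :: pvR old new t := by
  show pvRepl old new (t.length + 1) (c :: t) = _
  rw [pvRepl, if_neg (fun hb => h (List.isPrefixOf_iff_prefix.mp hb))]
  rfl

-- bridge PySem.Str.replace → pvR
theorem pvGoSpec (old new : List Char) (hold : old ≠ []) :
    ∀ fuel (l acc : List Char), l.length ≤ fuel →
      PySem.Chars.replace.go old new fuel l acc = acc.reverse ++ pvRepl old new fuel l := by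
  intro fuel
  induction fuel with
  | zero =>
    intro l acc h1
    have : l = [] := List.eq_nil_of_length_eq_zero (Nat.le_zero.mp h1)
    subst this
    simp [PySem.Chars.replace.go, pvRepl]
  | succ f ih =>
    intro l acc h1
    cases l with
    | nil => simp [PySem.Chars.replace.go, pvRepl]
    | cons c t =>
      rw [PySem.Chars.replace.go, pvRepl]
      by_cases hp : old.isPrefixOf (c :: t)
      · rw [if_pos hp, if_pos hp]
        have hd : (List.drop old.length (c :: t)).length = (c :: t).length - old.length :=
          List.length_drop
        have h1' := pvOldLen old hold
        rw [ih _ _ (by simp at h1 hd ⊢; omega)]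
        simp
      · rw [if_neg hp, if_neg hp]
        rw [ih _ _ (by simp at h1 ⊢; omega)]
        simp

theorem pvStrReplace (s old new : String) (hold : old.toList ≠ []) :
    (PySem.Str.replace s old new).toList = pvR old.toList new.toList s.toList := by
  show (String.ofList (PySem.Chars.replace s.toList old.toList new.toList)).toList = _
  rw [String.toList_ofList]
  unfold PySem.Chars.replace
  rw [if_neg (by simp [List.isEmpty_iff, hold])]
  rw [pvGoSpec _ _ hold _ _ _ le_rfl]
  simp [pvR]

-- persistence: a '<'-free non-prefix stays a non-prefix through one replace pass
theorem pvPFX (t' r' : List Char) (ht : t' ≠ []) (hlt : '<' ∈ r')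
    (hr2 : ∀ u ∈ r'.inits, '<' ∉ u → u <+: t') :
    ∀ n (u l : List Char), '<' ∉ u → l.length ≤ n → ¬ u <+: l → ¬ u <+: pvR t' r' l := by
  intro n
  induction n with
  | zero =>
    intro u l hu hn h
    have : l = [] := List.eq_nil_of_length_eq_zero (Nat.le_zero.mp hn)
    subst this; simpa [pvR_nil] using h
  | succ n ih =>
    intro u l hu hn h
    by_cases hp : t' <+: l
    · rw [pvR_pos _ _ _ ht hp]
      intro hcon
      have hr'pre : r' <+: r' ++ pvR t' r' (l.drop t'.length) := List.prefix_append _ _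
      rcases List.prefix_or_prefix_of_prefix hcon hr'pre with h1 | h2
      · exact h ((hr2 u ((List.mem_inits _ _).mpr h1) hu).trans hp)
      · exact hu (h2.mem hlt)
    · cases l with
      | nil => simpa [pvR_nil] using h
      | cons c t =>
        rw [pvR_neg _ _ _ _ hp]
        intro hcon
        cases u with
        | nil => exact h List.nil_prefix
        | cons a b =>
          rw [List.cons_prefix_cons] at hcon h
          push_neg at h
          have hub : '<' ∉ b := fun hm => hu (List.mem_cons_of_mem _ hm)
          exact ih b t hub (by simp at hn; omega) (h hcon.1) hcon.2

-- replace distributes over a prefix in which the pattern never starts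
theorem pvSKIP (t r : List Char) (ht : t ≠ []) :
    ∀ (x y : List Char), (∀ p < x.length, ¬ t <+: (x.drop p ++ y)) →
      pvR t r (x ++ y) = x ++ pvR t r y := by
  intro x
  induction x with
  | nil => intro y _; simp
  | cons c x' ih =>
    intro y hsafe
    have h0 : ¬ t <+: (c :: x') ++ y := by
      have := hsafe 0 (by simp)
      simpa using this
    have h0' : ¬ t <+: c :: (x' ++ y) := by simpa using h0
    show pvR t r (c :: (x' ++ y)) = _
    rw [pvR_neg _ _ _ _ h0', List.cons_append]
    congr 1
    exact ih y (fun p hp => by simpa using hsafe (p+1) (by simp; omega))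

-- inside an already-inserted replacement string no token can start
theorem pvSAFER (t r : List Char) (htok : pvTok t) (hlast : r.getLast? = some '>')
    (hsub : ¬ t <:+: r) : ∀ (y : List Char) (p : Nat), p < r.length → ¬ t <+: (r.drop p ++ y) := by
  intro y p hp hcon
  have hu : (r.drop p) <+: (r.drop p ++ y) := List.prefix_append _ _
  rcases List.prefix_or_prefix_of_prefix hcon hu with h1 | h2
  · exact hsub (h1.isInfix.trans (List.drop_suffix p r).isInfix)
  · have hne : r.drop p ≠ [] := by
      intro he
      have : r.length - p = 0 := by simpa [List.length_drop] using congrArg List.length he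
      omega
    have hlast2 : (r.drop p).getLast? = some '>' := by
      conv at hlast => rw [← List.take_append_drop p r]
      rwa [List.getLast?_append_of_ne_nil _ hne] at hlast
    have : '>' ∈ r.drop p := List.mem_of_getLast? hlast2
    exact htok.2.2 (h2.mem this)

def pvSafe (t tk m : List Char) : Prop := ∀ p < tk.length, ¬ t <+: (tk.drop p ++ m)

theorem pvSAFEstep (t tk t0 r0 m : List Char) (ht : '<' ∉ t) (ht0 : t0 ≠ [])
    (hlt0 : '<' ∈ r0) (hr20 : ∀ u ∈ r0.inits, '<' ∉ u → u <+: t0)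
    (hs : pvSafe t tk m) : pvSafe t tk (pvR t0 r0 m) := by
  intro p hp hcon
  have hu : (tk.drop p) <+: (tk.drop p ++ pvR t0 r0 m) := List.prefix_append _ _
  rcases List.prefix_or_prefix_of_prefix hcon hu with h1 | h2
  · exact hs p hp (h1.trans (List.prefix_append _ _))
  · have h3 : List.take (tk.drop p).length t = tk.drop p := (List.prefix_iff_eq_take.mp h2).symm
    have hts : t = tk.drop p ++ t.drop (tk.drop p).length := by
      calc t = t.take (tk.drop p).length ++ t.drop (tk.drop p).length :=
            (List.take_append_drop _ _).symm
        _ = tk.drop p ++ t.drop (tk.drop p).length := by rw [h3]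
    set v := t.drop (tk.drop p).length with hv
    have hvpre : v <+: pvR t0 r0 m := by
      have : tk.drop p ++ v <+: tk.drop p ++ pvR t0 r0 m := hts ▸ hcon
      exact (List.prefix_append_right_inj _).mp this
    have hvm : ¬ v <+: m := by
      intro hvm
      exact hs p hp (hts ▸ (List.prefix_append_right_inj (tk.drop p)).mpr hvm)
    have hvlt : '<' ∉ v := fun hm => ht (hts ▸ List.mem_append_right _ hm)
    exact pvPFX t0 r0 ht0 hlt0 hr20 m.length v m hvlt le_rfl hvm hvpre

theorem pvChain_nil (ts : List (List Char × List Char)) (hg : ∀ p ∈ ts, p.1 ≠ []) :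
    pvChain ts [] = [] := by
  induction ts with
  | nil => rfl
  | cons q ts' ih =>
    show pvChain ts' (pvR q.1 q.2 []) = []
    rw [pvR_nil]
    exact ih (fun p hp => hg p (List.mem_cons_of_mem _ hp))

-- KEY 1: no token starts at the head: the whole chain keeps the head char
theorem pvChain_cons (ts : List (List Char × List Char)) (c : Char) (x : List Char)
    (hg : pvGood ts) (hf : ∀ p ∈ ts, ¬ p.1 <+: (c :: x)) :
    pvChain ts (c :: x) = c :: pvChain ts x := by
  induction ts generalizing x with
  | nil => rfl
  | cons q ts' ih =>
    have hq := hg q List.mem_cons_self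
    have h0 : ¬ q.1 <+: (c :: x) := hf q List.mem_cons_self
    show pvChain ts' (pvR q.1 q.2 (c :: x)) = c :: pvChain ts' (pvR q.1 q.2 x)
    rw [pvR_neg _ _ _ _ h0]
    apply ih _ (fun p hp => hg p (List.mem_cons_of_mem _ hp))
    intro p hp hcon
    have hfp := hf p (List.mem_cons_of_mem _ hp)
    have htp := (hg p (List.mem_cons_of_mem _ hp)).1
    cases hpt : p.1 with
    | nil => exact htp.1 hpt
    | cons a b =>
      rw [hpt] at hcon hfp
      rw [List.cons_prefix_cons] at hcon hfp
      push_neg at hfp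
      have hb : '<' ∉ b := by
        intro hm
        exact htp.2.1 (by rw [hpt]; exact List.mem_cons_of_mem _ hm)
      exact pvPFX q.1 q.2 hq.1.1 hq.2.1 hq.2.2.2 x.length b x hb le_rfl (hfp hcon.1) hcon.2

-- pre-phases: the leftmost-matched token tk is untouched by phases that cannot start in it
theorem pvChain_pre (tk : List Char) (ts' : List (List Char × List Char)) :
    ∀ (m' : List Char), pvGood ts' → (∀ q ∈ ts', pvSafe q.1 tk m') →
      pvChain ts' (tk ++ m') = tk ++ pvChain ts' m' := by
  induction ts' with
  | nil => intro m' _ _; rfl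
  | cons q ts'' ih =>
    intro m' hg hs
    have hq := hg q List.mem_cons_self
    show pvChain ts'' (pvR q.1 q.2 (tk ++ m')) = tk ++ pvChain ts'' (pvR q.1 q.2 m')
    rw [pvSKIP q.1 q.2 hq.1.1 tk m' (hs q List.mem_cons_self)]
    apply ih _ (fun p hp => hg p (List.mem_cons_of_mem _ hp))
    intro p hp
    exact pvSAFEstep p.1 tk q.1 q.2 m' (hg p (List.mem_cons_of_mem _ hp)).1.2.1 hq.1.1
      hq.2.1 hq.2.2.2 (hs p (List.mem_cons_of_mem _ hp))

-- post-phases: an already-inserted replacement rk is never touched again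
theorem pvChain_post (rk : List Char) (ts₂ : List (List Char × List Char))
    (hlast : rk.getLast? = some '>') :
    ∀ (y : List Char), pvGood ts₂ → (∀ q ∈ ts₂, ¬ q.1 <:+: rk) →
      pvChain ts₂ (rk ++ y) = rk ++ pvChain ts₂ y := by
  induction ts₂ with
  | nil => intro y _ _; rfl
  | cons q ts' ih =>
    intro y hg hns
    have hq := hg q List.mem_cons_self
    show pvChain ts' (pvR q.1 q.2 (rk ++ y)) = rk ++ pvChain ts' (pvR q.1 q.2 y)
    rw [pvSKIP q.1 q.2 hq.1.1 rk y
      (fun p hp => pvSAFER q.1 rk hq.1 hlast (hns q List.mem_cons_self) y p hp)]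
    exact ih _ (fun p hp => hg p (List.mem_cons_of_mem _ hp))
      (fun p hp => hns p (List.mem_cons_of_mem _ hp))

-- scan: fuel irrelevance and step equations
theorem pvScanFuel (ts : List (List Char × List Char)) (hg : ∀ p ∈ ts, p.1 ≠ []) :
    ∀ f1 f2 (l : List Char), l.length ≤ f1 → l.length ≤ f2 →
      pvScanGo ts f1 l = pvScanGo ts f2 l := by
  intro f1
  induction f1 with
  | zero =>
    intro f2 l h1 _
    have : l = [] := List.eq_nil_of_length_eq_zero (Nat.le_zero.mp h1)
    subst this; cases f2 <;> rfl
  | succ f ih =>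
    intro f2 l h1 h2
    cases l with
    | nil => cases f2 <;> rfl
    | cons c t =>
      cases f2 with
      | zero => simp at h2
      | succ f2' =>
        cases hfind : ts.find? (fun p => p.1.isPrefixOf (c :: t)) with
        | none =>
          simp only [pvScanGo, hfind]
          congr 1
          exact ih f2' t (by simp at h1; omega) (by simp at h2; omega)
        | some q =>
          simp only [pvScanGo, hfind]
          have hmem : q ∈ ts := List.mem_of_find?_eq_some hfind
          have hpre : q.1 <+: (c :: t) := by
            have := List.find?_some hfind
            exact List.isPrefixOf_iff_prefix.mp this
          have hne := hg q hmem
          have hlen1 := pvOldLen q.1 hne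
          have hd : (List.drop q.1.length (c :: t)).length = (c :: t).length - q.1.length :=
            List.length_drop
          congr 1
          exact ih f2' _ (by simp at h1 hd ⊢; omega) (by simp at h2 hd ⊢; omega)

theorem pvScan_neg (ts : List (List Char × List Char)) (c : Char) (t : List Char)
    (hfind : ts.find? (fun p => p.1.isPrefixOf (c :: t)) = none) :
    pvScan ts (c :: t) = c :: pvScan ts t := by
  show pvScanGo ts (t.length + 1) (c :: t) = _
  simp only [pvScanGo, hfind]
  rfl

theorem pvScan_pos (ts : List (List Char × List Char)) (hg : ∀ p ∈ ts, p.1 ≠ [])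
    (c : Char) (t : List Char) (tk rk : List Char)
    (hfind : ts.find? (fun p => p.1.isPrefixOf (c :: t)) = some (tk, rk)) :
    pvScan ts (c :: t) = rk ++ pvScan ts (List.drop tk.length (c :: t)) := by
  show pvScanGo ts (t.length + 1) (c :: t) = _
  simp only [pvScanGo, hfind]
  congr 1
  have hne := hg _ (List.mem_of_find?_eq_some hfind)
  have hlen1 := pvOldLen tk hne
  have hd : (List.drop tk.length (c :: t)).length = (c :: t).length - tk.length :=
    List.length_drop
  exact pvScanFuel ts hg _ _ _ (by simp at hd ⊢; omega) le_rfl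

theorem pvPrefixSplit (u t : List Char) (h : u <+: t) : t = u ++ t.drop u.length := by
  have h3 : List.take u.length t = u := (List.prefix_iff_eq_take.mp h).symm
  calc t = t.take u.length ++ t.drop u.length := (List.take_append_drop _ _).symm
    _ = u ++ t.drop u.length := by rw [h3]

theorem pvPreL_mono (ts : List (List Char × List Char)) (l l' : List Char)
    (h : pvPreL ts l) (hs : l' <:+ l) : pvPreL ts l' := by
  intro ts₁ q ts₂ hsplit p1 hp1 p hp0 hplen hpre hcon
  exact h ts₁ q ts₂ hsplit p1 hp1 p hp0 hplen hpre (hcon.trans hs.isInfix)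

theorem pvChain_append (A B : List (List Char × List Char)) (l : List Char) :
    pvChain (A ++ B) l = pvChain B (pvChain A l) := List.foldl_append

-- MAIN: the 14 sequential replace passes equal the single left-to-right scan
theorem pvMAIN (ts : List (List Char × List Char)) (hg : pvGood ts) (hsub : pvSub ts)
    (hrsub : pvRsubOrd ts) :
    ∀ n (l : List Char), l.length ≤ n → pvPreL ts l → pvChain ts l = pvScan ts l := by
  have hne : ∀ p ∈ ts, p.1 ≠ [] := fun p hp => (hg p hp).1.1
  intro n
  induction n with
  | zero =>
    intro l hn _
    have : l = [] := List.eq_nil_of_length_eq_zero (Nat.le_zero.mp hn)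
    subst this
    rw [pvChain_nil ts hne]; rfl
  | succ n ih =>
    intro l hn hpre
    cases l with
    | nil => rw [pvChain_nil ts hne]; rfl
    | cons c t =>
      cases hfind : ts.find? (fun p => p.1.isPrefixOf (c :: t)) with
      | none =>
        have hf : ∀ p ∈ ts, ¬ p.1 <+: (c :: t) := by
          intro p hp hcon
          have := List.find?_eq_none.mp hfind p hp
          simp [List.isPrefixOf_iff_prefix.mpr hcon] at this
        rw [pvScan_neg ts c t hfind, pvChain_cons ts c t hg hf]
        congr 1
        exact ih t (by simp at hn; omega) (pvPreL_mono ts _ _ hpre (List.suffix_cons c t))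
      | some q =>
        obtain ⟨tk, rk⟩ := q
        obtain ⟨hpred, ts₁, ts₂, hsplit, hfails⟩ := List.find?_eq_some_iff_append.mp hfind
        have hpre_tk : tk <+: (c :: t) := List.isPrefixOf_iff_prefix.mp hpred
        obtain ⟨m, hm⟩ := hpre_tk
        have htk_mem : (tk, rk) ∈ ts := by
          rw [hsplit]; exact List.mem_append_right _ List.mem_cons_self
        have htok := (hg _ htk_mem).1
        have hrep := (hg _ htk_mem).2
        have hmem₁ : ∀ q1 ∈ ts₁, q1 ∈ ts := by
          intro q1 hq1; rw [hsplit]; exact List.mem_append_left _ hq1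
        have hmem₂ : ∀ q1 ∈ ts₂, q1 ∈ ts := by
          intro q1 hq1; rw [hsplit]
          exact List.mem_append_right _ (List.mem_cons_of_mem _ hq1)
        -- the leftmost-matched token is safe against every earlier-phase token
        have hsafe : ∀ q1 ∈ ts₁, pvSafe q1.1 tk m := by
          intro q1 hq1 p hp hcon
          by_cases hp0 : p = 0
          · subst hp0
            simp only [List.drop_zero] at hcon
            rw [hm] at hcon
            have := hfails q1 hq1
            simp [List.isPrefixOf_iff_prefix.mpr hcon] at this
          · have hppos : 0 < p := Nat.pos_of_ne_zero hp0
            have hu : tk.drop p <+: (tk.drop p ++ m) := List.prefix_append _ _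
            rcases List.prefix_or_prefix_of_prefix hcon hu with h1 | h2
            · have hinf : q1.1 <:+: tk := h1.isInfix.trans (List.drop_suffix p tk).isInfix
              have heq : q1.1 = tk := hsub q1 (hmem₁ q1 hq1) (tk, rk) htk_mem hinf
              have hlen : q1.1.length ≤ (tk.drop p).length := h1.length_le
              rw [heq] at hlen
              simp [List.length_drop] at hlen
              omega
            · have hts : q1.1 = tk.drop p ++ q1.1.drop (tk.drop p).length :=
                pvPrefixSplit _ _ h2
              have hv : q1.1.drop (tk.drop p).length <+: m := by
                apply (List.prefix_append_right_inj (tk.drop p)).mp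
                rw [← hts]; exact hcon
              have hdlen : (tk.drop p).length = tk.length - p := List.length_drop
              have hbad := hpre ts₁ (tk, rk) ts₂ hsplit q1 hq1 p hppos hp h2
              apply hbad
              rw [← hm]
              apply List.IsPrefix.isInfix
              apply (List.prefix_append_right_inj tk).mpr
              rw [← hdlen]
              exact hv
        have hg₁ : pvGood ts₁ := fun p hp => hg p (hmem₁ p hp)
        have hg₂ : pvGood ts₂ := fun p hp => hg p (hmem₂ p hp)
        have hchain : pvChain ts (c :: t) = rk ++ pvChain ts m := by
          rw [← hm, hsplit]
          calc pvChain (ts₁ ++ (tk, rk) :: ts₂) (tk ++ m)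
              = pvChain ((tk, rk) :: ts₂) (pvChain ts₁ (tk ++ m)) := pvChain_append _ _ _
            _ = pvChain ((tk, rk) :: ts₂) (tk ++ pvChain ts₁ m) := by
                rw [pvChain_pre tk ts₁ m hg₁ hsafe]
            _ = pvChain ts₂ (pvR tk rk (tk ++ pvChain ts₁ m)) := rfl
            _ = pvChain ts₂ (rk ++ pvR tk rk (pvChain ts₁ m)) := by
                rw [pvR_pos tk rk _ htok.1 (List.prefix_append _ _), List.drop_left]
            _ = rk ++ pvChain ts₂ (pvR tk rk (pvChain ts₁ m)) :=
                pvChain_post rk ts₂ hrep.2.1 _ hg₂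
                  (fun q1 hq1 => hrsub ts₁ (tk, rk) ts₂ hsplit q1 hq1)
            _ = rk ++ pvChain (ts₁ ++ (tk, rk) :: ts₂) m := by rw [pvChain_append]; rfl
        have hscan : pvScan ts (c :: t) = rk ++ pvScan ts m := by
          rw [pvScan_pos ts hne c t tk rk hfind]
          congr 2
          rw [← hm, List.drop_left]
        rw [hchain, hscan]
        congr 1
        have hlm : tk.length + m.length = t.length + 1 := by
          have := congrArg List.length hm
          simpa using this
        have htl := pvOldLen tk htok.1
        apply ih m (by simp at hn; omega)
        apply pvPreL_mono ts _ _ hpre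
        rw [← hm]
        exact List.suffix_append _ _

-- ---- concrete-table facts (decided once) ----
def pvOverlapsL : List (List Char) := pvOverlaps.map String.toList

theorem pvGoodT : pvGood pvTable := by
  unfold pvGood pvTok pvRepOK; decide

theorem pvSubT : pvSub pvTable := by
  unfold pvSub; decide

set_option maxHeartbeats 1000000 in
theorem pvRsubT : ∀ a (ha : a < pvTable.length), ∀ b (hb : b < pvTable.length), b < a →
    ¬ ((pvTable[a]'ha).1 <:+: (pvTable[b]'hb).2) := by decide

set_option maxHeartbeats 1000000 in
theorem pvEnumIdx : ∀ b (hb : b < pvTable.length), ∀ a (ha : a < pvTable.length), a < b →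
    ∀ p (_ : p < (pvTable[b].1).length), 0 < p →
    ((pvTable[b].1).drop p).isPrefixOf ((pvTable[a]'ha).1) = true →
    ((pvTable[b].1) ++ ((pvTable[a]'ha).1).drop ((pvTable[b].1).length - p)) ∈ pvOverlapsL := by
  decide

-- split position → indices
theorem pvSplitIdx₁ (ts ts₁ ts₂ : List (List Char × List Char)) (q p1 : List Char × List Char)
    (hsplit : ts = ts₁ ++ q :: ts₂) (hp1 : p1 ∈ ts₁) :
    ∃ a, ∃ (ha : a < ts.length), ∃ b, ∃ (hb : b < ts.length), a < b ∧ (ts[a]'ha) = p1 ∧ (ts[b]'hb) = q := by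
  subst hsplit
  obtain ⟨a, ha, hget⟩ := List.mem_iff_getElem.mp hp1
  have hlen : (ts₁ ++ q :: ts₂).length = ts₁.length + (ts₂.length + 1) := by simp
  refine ⟨a, by omega, ts₁.length, by omega, by omega, ?_, ?_⟩
  · rw [List.getElem_append_left ha]; exact hget
  · rw [List.getElem_append_right (le_refl ts₁.length)]; simp

theorem pvSplitIdx₂ (ts ts₁ ts₂ : List (List Char × List Char)) (q p1 : List Char × List Char)
    (hsplit : ts = ts₁ ++ q :: ts₂) (hp1 : p1 ∈ ts₂) :
    ∃ a, ∃ (ha : a < ts.length), ∃ b, ∃ (hb : b < ts.length), b < a ∧ (ts[a]'ha) = p1 ∧ (ts[b]'hb) = q := by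
  subst hsplit
  obtain ⟨i, hi, hget⟩ := List.mem_iff_getElem.mp hp1
  have hlen : (ts₁ ++ q :: ts₂).length = ts₁.length + (ts₂.length + 1) := by simp
  refine ⟨ts₁.length + 1 + i, by omega, ts₁.length, by omega, by omega, ?_, ?_⟩
  · rw [List.getElem_append_right (by omega : ts₁.length ≤ ts₁.length + 1 + i)]
    have h2 : ts₁.length + 1 + i - ts₁.length = i + 1 := by omega
    simp only [h2, List.getElem_cons_succ]
    exact hget
  · rw [List.getElem_append_right (le_refl ts₁.length)]; simp

theorem pvRsubOrdT : pvRsubOrd pvTable := by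
  intro ts₁ q ts₂ hsplit p1 hp1
  obtain ⟨a, ha, b, hb, hba, hgA, hgB⟩ := pvSplitIdx₂ pvTable ts₁ ts₂ q p1 hsplit hp1
  have := pvRsubT a ha b hb hba
  rw [hgA, hgB] at this
  exact this

theorem pvPreT (l : List Char) (h : ∀ s ∈ pvOverlapsL, ¬ s <:+: l) : pvPreL pvTable l := by
  intro ts₁ q ts₂ hsplit p1 hp1 p hp0 hplen hpre hcon
  obtain ⟨a, ha, b, hb, hab, hgA, hgB⟩ := pvSplitIdx₁ pvTable ts₁ ts₂ q p1 hsplit hp1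
  have hmem := pvEnumIdx b hb a ha hab p (by rw [hgB]; exact hplen) hp0
    (by rw [hgA, hgB]; exact List.isPrefixOf_iff_prefix.mpr hpre)
  rw [hgA, hgB] at hmem
  exact h _ hmem hcon

-- ===== VERDICT (by name: the statement is the Claim_ definition above) =====
set_option maxHeartbeats 4000000 in
theorem prepare_medical_ssml_py_spec : Claim_equal_prepare_medical_ssml_py := by
  unfold Claim_equal_prepare_medical_ssml_py
  intro text _hdom hpre
  unfold Spec_prepare_medical_ssml_py
  apply String.toList_inj.mp
  have hpreL : pvPreL pvTable text.toList := by
    apply pvPreT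
    intro s hs hcon
    unfold pvOverlapsL at hs
    obtain ⟨s0, hs0, rfl⟩ := List.mem_map.mp hs
    have hf := hpre s0 hs0
    rw [(PySem.Str.isIn_iff_infix s0 text).mpr hcon] at hf
    cases hf
  have hmain := pvMAIN pvTable pvGoodT pvSubT pvRsubOrdT text.toList.length text.toList
    le_rfl hpreL
  have hA : (prepare_medical_ssml_py text).toList =
      "<speak><prosody rate=\"medium\" pitch=\"medium\">".toList ++
        pvChain pvTable text.toList ++ "</prosody></speak>".toList := by
    unfold prepare_medical_ssml_py
    simp only [List.foldl_cons, List.foldl_nil]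
    rw [String.toList_append, String.toList_append]
    rw [show ("<emphasis level=\"strong\">" ++ "emergency" ++ "</emphasis>") =
      "<emphasis level=\"strong\">emergency</emphasis>" from rfl]
    rw [show ("<emphasis level=\"strong\">" ++ "urgent" ++ "</emphasis>") =
      "<emphasis level=\"strong\">urgent</emphasis>" from rfl]
    rw [show ("<emphasis level=\"strong\">" ++ "critical" ++ "</emphasis>") =
      "<emphasis level=\"strong\">critical</emphasis>" from rfl]
    rw [show ("<emphasis level=\"strong\">" ++ "severe" ++ "</emphasis>") =
      "<emphasis level=\"strong\">severe</emphasis>" from rfl]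
    rw [show ("<emphasis level=\"strong\">" ++ "immediate" ++ "</emphasis>") =
      "<emphasis level=\"strong\">immediate</emphasis>" from rfl]
    rw [pvStrReplace _ _ _ (by decide), pvStrReplace _ _ _ (by decide),
      pvStrReplace _ _ _ (by decide), pvStrReplace _ _ _ (by decide),
      pvStrReplace _ _ _ (by decide), pvStrReplace _ _ _ (by decide),
      pvStrReplace _ _ _ (by decide), pvStrReplace _ _ _ (by decide),
      pvStrReplace _ _ _ (by decide), pvStrReplace _ _ _ (by decide),
      pvStrReplace _ _ _ (by decide), pvStrReplace _ _ _ (by decide),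
      pvStrReplace _ _ _ (by decide), pvStrReplace _ _ _ (by decide)]
    unfold pvChain pvTable
    simp only [List.foldl_cons, List.foldl_nil]
  have hB : (prepare_medical_ssml_py_alt text).toList =
      "<speak><prosody rate=\"medium\" pitch=\"medium\">".toList ++
        pvScan pvTable text.toList ++ "</prosody></speak>".toList := by
    unfold prepare_medical_ssml_py_alt
    simp only [String.toList_append, String.toList_ofList]
    rfl
  show (prepare_medical_ssml_py text).toList = (prepare_medical_ssml_py_alt text).toList
  rw [hA, hB, hmain]
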